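-- pv_equiv track=rewrite | github.com/zen-integration/algorithm_code | t退避/main_arry.py | check_win_from_position
-- ===== SOURCE A (Python) =====
-- from typing import List, Tuple, Optional
--
-- def check_win_from_position(board: List[List[List[int]]], x: int, y: int, z: int, player: int) -> bool:
--     """指定した位置から4つ並んでいるかチェック"""
--     directions = [
--         # X軸方向
--         (1, 0, 0), # Y軸方向
--         (0, 1, 0), # Z軸方向
--         (0, 0, 1), # XY平面の斜め
--         (1, 1, 0), (1, -1, 0), # XZ平面の斜め
--         (1, 0, 1), (1, 0, -1), # YZ平面の斜め
--         (0, 1, 1), (0, 1, -1), # 3D対角線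
--         (1, 1, 1), (1, 1, -1), (1, -1, 1), (-1, 1, 1)
--     ]
--
--     for dx, dy, dz in directions:
--         count = 1  # 現在の石を含む
--
--         # 正方向にカウント
--         nx, ny, nz = x + dx, y + dy, z + dz
--         while (0 <= nx < 4 and 0 <= ny < 4 and 0 <= nz < 4 and
--                board[nz][ny][nx] == player):
--             count += 1
--             nx, ny, nz = nx + dx, ny + dy, nz + dz
--
--         # 負方向にカウント
--         nx, ny, nz = x - dx, y - dy, z - dz
--         while (0 <= nx < 4 and 0 <= ny < 4 and 0 <= nz < 4 and
--                board[nz][ny][nx] == player):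
--             count += 1
--             nx, ny, nz = nx - dx, ny - dy, nz - dz
--
--         if count >= 4:
--             return True
--
--     return False
-- ===== SOURCE B (Python) =====
-- def check_win_from_position(board, x, y, z, player):
--     """指定した位置から4つ並んでいるかチェック (fixed-size window scan)"""
--     directions = [
--         (1, 0, 0),
--         (0, 1, 0),
--         (0, 0, 1),
--         (1, 1, 0), (1, -1, 0),
--         (1, 0, 1), (1, 0, -1),
--         (0, 1, 1), (0, 1, -1),
--         (1, 1, 1), (1, 1, -1), (1, -1, 1), (-1, 1, 1)
--     ]
--     for dx, dy, dz in directions: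
--         # the four length-4 windows along this line that contain (x, y, z);
--         # probe a window's cells nearest the position first
--         for s in range(-3, 1):
--             if all(window_cell_ok(board, x, y, z, player, dx, dy, dz, t)
--                    for t in sorted(range(s, s + 4), key=abs)):
--                 return True
--     return False
--
--
-- def window_cell_ok(board, x, y, z, player, dx, dy, dz, t):
--     """cell at signed offset t along the line: the position itself, or an
--     in-bounds cell holding the player's stone"""
--     if t == 0:
--         return True
--     cx, cy, cz = x + t * dx, y + t * dy, z + t * dz
--     return (0 <= cx < 4 and 0 <= cy < 4 and 0 <= cz < 4
--             and board[cz][cy][cx] == player)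
-- ===== Notes on version B (the rewrite author's own statement) =====
-- stated objective: alternative
-- what changed: Replaces two-way center-expansion run counting per direction by enumerating the four fixed length-4 windows along each line that contain the position and testing each window's cells (nearest the position first).
import Mathlib
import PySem

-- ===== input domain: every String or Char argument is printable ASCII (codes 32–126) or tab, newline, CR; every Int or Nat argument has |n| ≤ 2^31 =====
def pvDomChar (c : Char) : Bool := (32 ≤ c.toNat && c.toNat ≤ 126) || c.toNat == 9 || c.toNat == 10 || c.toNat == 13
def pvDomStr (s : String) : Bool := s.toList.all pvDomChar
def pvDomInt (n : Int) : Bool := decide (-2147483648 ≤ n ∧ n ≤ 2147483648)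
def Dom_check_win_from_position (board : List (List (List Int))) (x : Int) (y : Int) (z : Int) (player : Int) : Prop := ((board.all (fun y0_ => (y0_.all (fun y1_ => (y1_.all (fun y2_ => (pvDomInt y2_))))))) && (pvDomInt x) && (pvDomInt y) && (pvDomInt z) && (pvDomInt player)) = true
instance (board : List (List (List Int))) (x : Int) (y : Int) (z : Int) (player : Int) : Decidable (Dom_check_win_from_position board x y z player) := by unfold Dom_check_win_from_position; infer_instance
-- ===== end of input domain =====

-- B replaces A's two-way center-expansion run counting by scanning the four
-- fixed length-4 windows that contain the position along each of the 13 lines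
-- (objective: alternative decomposition, same cost).


-- ===== PORT A =====
-- A's 13 direction vectors, in A's order
def pvDirectionsA : List (Int × Int × Int) :=
  [(1,0,0), (0,1,0), (0,0,1), (1,1,0), (1,-1,0), (1,0,1), (1,0,-1),
   (0,1,1), (0,1,-1), (1,1,1), (1,1,-1), (1,-1,1), (-1,1,1)]

-- board[nz][ny][nx] (only reached with 0 ≤ index < 4; none = missing cell, excluded by Pre_)
def pvAccess (board : List (List (List Int))) (nx ny nz : Int) : Option Int :=
  (PySem.List.pyGet? board nz).bind (fun p => (PySem.List.pyGet? p ny).bind (fun r => PySem.List.pyGet? r nx))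

-- the while-loop condition of A
def pvCondA (board : List (List (List Int))) (player nx ny nz : Int) : Bool :=
  decide (0 ≤ nx) && decide (nx < 4) && decide (0 ≤ ny) && decide (ny < 4) &&
  decide (0 ≤ nz) && decide (nz < 4) && (pvAccess board nx ny nz == some player)

-- A's while loop (both loops: the negative one is the same loop with the negated step).
-- fuel 8 is ample: each accepted step moves a coordinate that stays inside [0,4),
-- so the Python loop iterates at most 4 times.
def pvCountA (board : List (List (List Int))) (player : Int) :
    Nat → Int → Int → Int → Int → Int → Int → Nat
  | 0, _, _, _, _, _, _ => 0
  | fuel+1, nx, ny, nz, dx, dy, dz =>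
    if pvCondA board player nx ny nz then
      1 + pvCountA board player fuel (nx+dx) (ny+dy) (nz+dz) dx dy dz
    else 0

def check_win_from_position (board : List (List (List Int))) (x : Int) (y : Int) (z : Int) (player : Int) : Bool :=
  pvDirectionsA.any (fun d =>
    let dx := d.1; let dy := d.2.1; let dz := d.2.2
    let count : Int := 1
      + (pvCountA board player 8 (x+dx) (y+dy) (z+dz) dx dy dz : Int)
      + (pvCountA board player 8 (x-dx) (y-dy) (z-dz) (-dx) (-dy) (-dz) : Int)
    decide (4 ≤ count))

-- board[cz][cy][cx] for B (only reached with 0 ≤ index < 4)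
def pvAccessB (board : List (List (List Int))) (cx cy cz : Int) : Option Int :=
  (PySem.List.pyGet? board cz).bind (fun p => (PySem.List.pyGet? p cy).bind (fun r => PySem.List.pyGet? r cx))

-- ===== PORT B =====
def pvDirectionsB : List (Int × Int × Int) :=
  [(1,0,0), (0,1,0), (0,0,1), (1,1,0), (1,-1,0), (1,0,1), (1,0,-1),
   (0,1,1), (0,1,-1), (1,1,1), (1,1,-1), (1,-1,1), (-1,1,1)]

-- window_cell_ok: the position itself (offset 0), or an in-bounds cell holding player's stone
def pvCellB (board : List (List (List Int))) (x y z player dx dy dz t : Int) : Bool :=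
  if t == 0 then true
  else
    decide (0 ≤ x+t*dx) && decide (x+t*dx < 4) && decide (0 ≤ y+t*dy) && decide (y+t*dy < 4) &&
    decide (0 ≤ z+t*dz) && decide (z+t*dz < 4) && (pvAccessB board (x+t*dx) (y+t*dy) (z+t*dz) == some player)

def check_win_from_position_alt (board : List (List (List Int))) (x : Int) (y : Int) (z : Int) (player : Int) : Bool :=
  pvDirectionsB.any (fun d =>
    (PySem.List.pyRange (-3) 1 1).any (fun s =>
      (PySem.List.sorted (PySem.List.pyRange s (s+4) 1) (fun t => |t|)).all
        (fun t => pvCellB board x y z player d.1 d.2.1 d.2.2 t)))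

-- ===== PRECONDITION & SPEC =====
-- helpers for Pre_ (ragged-board cell lookup; indices are nonnegative where used)
def pvCell? (board : List (List (List Int))) (cx cy cz : Int) : Option Int :=
  (board[cz.toNat]?.bind (fun p => p[cy.toNat]?)).bind (fun r => r[cx.toNat]?)

def pvInCube (cx cy cz : Int) : Prop :=
  0 ≤ cx ∧ cx < 4 ∧ 0 ≤ cy ∧ cy < 4 ∧ 0 ≤ cz ∧ cz < 4

def pvDirectionsPre : List (Int × Int × Int) :=
  [(1,0,0), (0,1,0), (0,0,1), (1,1,0), (1,-1,0), (1,0,1), (1,0,-1),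
   (0,1,1), (0,1,-1), (1,1,1), (1,1,-1), (1,-1,1), (-1,1,1)]

-- Pre_ = exactly the inputs on which Python A returns normally: along each of the 13
-- lines and each side, whenever the k-1 cells nearest the position are in-range player
-- stones and the k-th cell is in range, that cell must actually exist in the (possibly
-- ragged) board — otherwise A raises IndexError. On a full 4x4x4 board this is vacuous.
def Pre_check_win_from_position (board : List (List (List Int))) (x : Int) (y : Int) (z : Int) (player : Int) : Prop :=
  ∀ d ∈ pvDirectionsPre, ∀ σ ∈ ([1, -1] : List Int), ∀ k ∈ ([1, 2, 3, 4] : List Int),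
    ((∀ t ∈ ([1, 2, 3] : List Int), t < k →
        (pvInCube (x+σ*t*d.1) (y+σ*t*d.2.1) (z+σ*t*d.2.2) ∧
         pvCell? board (x+σ*t*d.1) (y+σ*t*d.2.1) (z+σ*t*d.2.2) = some player)) ∧
      pvInCube (x+σ*k*d.1) (y+σ*k*d.2.1) (z+σ*k*d.2.2)) →
    pvCell? board (x+σ*k*d.1) (y+σ*k*d.2.1) (z+σ*k*d.2.2) ≠ none

instance (board : List (List (List Int))) (x : Int) (y : Int) (z : Int) (player : Int) : Decidable (Pre_check_win_from_position board x y z player) := by unfold Pre_check_win_from_position pvInCube; infer_instance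

def pvWitness_check_win_from_position : List (List (List Int)) × Int × Int × Int × Int :=
  (List.replicate 4 (List.replicate 4 (List.replicate 4 (0 : Int))), 1, 2, 3, 1)

def Spec_check_win_from_position (board : List (List (List Int))) (x : Int) (y : Int) (z : Int) (player : Int) (out : Bool) : Prop := out = check_win_from_position_alt board x y z player
instance (board : List (List (List Int))) (x : Int) (y : Int) (z : Int) (player : Int) (out : Bool) : Decidable (Spec_check_win_from_position board x y z player out) := by unfold Spec_check_win_from_position; infer_instance

-- ===== CLAIM (what is proved, stated in full; the proofs are below) =====
def Claim_equal_check_win_from_position : Prop := ∀ (board : List (List (List Int))) (x : Int) (y : Int) (z : Int) (player : Int), Dom_check_win_from_position board x y z player → Pre_check_win_from_position board x y z player → Spec_check_win_from_position board x y z player (check_win_from_position board x y z player)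

-- ===== LEMMAS AND PROOFS =====

-- abstract run counter along a line: g is the cell predicate at signed offset t
def pvRunF (g : Int → Bool) : Nat → Int → Int → Nat
  | 0, _, _ => 0
  | n+1, t, s => if g t then 1 + pvRunF g n (t+s) s else 0

lemma pvCountA_eq_runF (board : List (List (List Int))) (player x y z dx dy dz : Int)
    (s : Int) (n : Nat) (t : Int) :
    pvCountA board player n (x+t*dx) (y+t*dy) (z+t*dz) (s*dx) (s*dy) (s*dz)
      = pvRunF (fun t => pvCondA board player (x+t*dx) (y+t*dy) (z+t*dz)) n t s := by
  induction n generalizing t with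
  | zero => simp [pvCountA, pvRunF]
  | succ n ih =>
    simp only [pvCountA, pvRunF]
    split
    · rw [show x + t*dx + s*dx = x + (t+s)*dx by ring,
          show y + t*dy + s*dy = y + (t+s)*dy by ring,
          show z + t*dz + s*dz = z + (t+s)*dz by ring, ih]
    · rfl

lemma pvRunF_stop (g : Int → Bool) (n : Nat) (t s : Int) (h : g t = false) :
    pvRunF g (n+1) t s = 0 := by simp [pvRunF, h]

lemma pvRunF_step (g : Int → Bool) (n : Nat) (t s : Int) (h : g t = true) :
    pvRunF g (n+1) t s = 1 + pvRunF g n (t+s) s := by simp [pvRunF, h]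

-- the per-direction crux: run counting ≥ 4 iff some length-4 window of the line is
-- all-good, where offset 0 (the position) is free
lemma pvCrux (g : Int → Bool) :
    decide (4 ≤ 1 + (pvRunF g 8 1 1 : Int) + (pvRunF g 8 (-1) (-1) : Int)) =
    ((PySem.List.pyRange (-3) 1 1).any (fun s =>
      (PySem.List.sorted (PySem.List.pyRange s (s+4) 1) (fun t => |t|)).all
        (fun t => if t == 0 then true else g t))) := by
  have hrhs : ((PySem.List.pyRange (-3) 1 1).any (fun s =>
      (PySem.List.sorted (PySem.List.pyRange s (s+4) 1) (fun t => |t|)).all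
        (fun t => if t == 0 then true else g t))) =
      ((g (-3) && g (-2) && g (-1)) || (g (-2) && g (-1) && g 1) ||
       (g (-1) && g 1 && g 2) || (g 1 && g 2 && g 3)) := by
    rw [show PySem.List.pyRange (-3) 1 1 = ([-3,-2,-1,0] : List Int) from by decide]
    simp only [List.any_cons, List.any_nil]
    rw [show PySem.List.sorted (PySem.List.pyRange (-3) (-3+4) 1) (fun t : Int => |t|) = ([0,-1,-2,-3] : List Int) from by decide,
        show PySem.List.sorted (PySem.List.pyRange (-2) (-2+4) 1) (fun t : Int => |t|) = ([0,-1,1,-2] : List Int) from by decide,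
        show PySem.List.sorted (PySem.List.pyRange (-1) (-1+4) 1) (fun t : Int => |t|) = ([0,-1,1,2] : List Int) from by decide,
        show PySem.List.sorted (PySem.List.pyRange 0 (0+4) 1) (fun t : Int => |t|) = ([0,1,2,3] : List Int) from by decide]
    simp only [List.all_cons, List.all_nil]
    norm_num
    cases g (-3) <;> cases g (-2) <;> cases g (-1) <;> cases g 1 <;> cases g 2 <;> cases g 3 <;> simp
  rw [hrhs]
  by_cases h1 : g 1 = true
  · by_cases h2 : g 2 = true
    · by_cases h3 : g 3 = true
      · -- forward run ≥ 3, both sides true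
        have : 3 ≤ pvRunF g 8 1 1 := by
          rw [pvRunF_step g 7 1 1 h1]
          rw [show (1:Int)+1 = 2 by norm_num, pvRunF_step g 6 2 1 h2]
          rw [show (2:Int)+1 = 3 by norm_num, pvRunF_step g 5 3 1 h3]
          omega
        simp [h1, h2, h3]
        omega
      · have hf : pvRunF g 8 1 1 = 2 := by
          rw [pvRunF_step g 7 1 1 h1, show (1:Int)+1 = 2 by norm_num,
              pvRunF_step g 6 2 1 h2, show (2:Int)+1 = 3 by norm_num,
              pvRunF_stop g 5 3 1 (by simpa using h3)]
        by_cases hb1 : g (-1) = true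
        · have : 1 ≤ pvRunF g 8 (-1) (-1) := by
            rw [pvRunF_step g 7 (-1) (-1) hb1]; omega
          simp [h1, h2, h3, hb1, hf]; omega
        · have hb : pvRunF g 8 (-1) (-1) = 0 := pvRunF_stop g 7 (-1) (-1) (by simpa using hb1)
          simp [h1, h3, hb1, hf, hb]
    · have hf : pvRunF g 8 1 1 = 1 := by
        rw [pvRunF_step g 7 1 1 h1, show (1:Int)+1 = 2 by norm_num,
            pvRunF_stop g 6 2 1 (by simpa using h2)]
      by_cases hb1 : g (-1) = true
      · by_cases hb2 : g (-2) = true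
        · have : 2 ≤ pvRunF g 8 (-1) (-1) := by
            rw [pvRunF_step g 7 (-1) (-1) hb1, show (-1:Int)+(-1) = -2 by norm_num,
                pvRunF_step g 6 (-2) (-1) hb2]
            omega
          simp [h1, h2, hb1, hb2, hf]; omega
        · have hb : pvRunF g 8 (-1) (-1) = 1 := by
            rw [pvRunF_step g 7 (-1) (-1) hb1, show (-1:Int)+(-1) = -2 by norm_num,
                pvRunF_stop g 6 (-2) (-1) (by simpa using hb2)]
          simp [h1, h2, hb1, hb2, hf, hb]
      · have hb : pvRunF g 8 (-1) (-1) = 0 := pvRunF_stop g 7 (-1) (-1) (by simpa using hb1)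
        simp [h1, h2, hb1, hf, hb]
  · have hf : pvRunF g 8 1 1 = 0 := pvRunF_stop g 7 1 1 (by simpa using h1)
    by_cases hb1 : g (-1) = true
    · by_cases hb2 : g (-2) = true
      · by_cases hb3 : g (-3) = true
        · have : 3 ≤ pvRunF g 8 (-1) (-1) := by
            rw [pvRunF_step g 7 (-1) (-1) hb1, show (-1:Int)+(-1) = -2 by norm_num,
                pvRunF_step g 6 (-2) (-1) hb2, show (-2:Int)+(-1) = -3 by norm_num,
                pvRunF_step g 5 (-3) (-1) hb3]
            omega
          simp [hb1, hb2, hb3]; omega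
        · have hb : pvRunF g 8 (-1) (-1) = 2 := by
            rw [pvRunF_step g 7 (-1) (-1) hb1, show (-1:Int)+(-1) = -2 by norm_num,
                pvRunF_step g 6 (-2) (-1) hb2, show (-2:Int)+(-1) = -3 by norm_num,
                pvRunF_stop g 5 (-3) (-1) (by simpa using hb3)]
          simp [h1, hb1, hb2, hb3, hf, hb]
      · have hb : pvRunF g 8 (-1) (-1) = 1 := by
          rw [pvRunF_step g 7 (-1) (-1) hb1, show (-1:Int)+(-1) = -2 by norm_num,
              pvRunF_stop g 6 (-2) (-1) (by simpa using hb2)]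
        simp [h1, hb1, hb2, hf, hb]
    · have hb : pvRunF g 8 (-1) (-1) = 0 := pvRunF_stop g 7 (-1) (-1) (by simpa using hb1)
      simp [h1, hb1, hf, hb]

-- per-direction equality of A's body and B's body
lemma pvDirEq (board : List (List (List Int))) (x y z player dx dy dz : Int) :
    (decide (4 ≤ 1 + (pvCountA board player 8 (x+dx) (y+dy) (z+dz) dx dy dz : Int)
                    + (pvCountA board player 8 (x-dx) (y-dy) (z-dz) (-dx) (-dy) (-dz) : Int))) =
    ((PySem.List.pyRange (-3) 1 1).any (fun s =>
      (PySem.List.sorted (PySem.List.pyRange s (s+4) 1) (fun t => |t|)).all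
        (fun t => pvCellB board x y z player dx dy dz t))) := by
  set g : Int → Bool := fun t => pvCondA board player (x+t*dx) (y+t*dy) (z+t*dz) with hg
  have hfwd : pvCountA board player 8 (x+dx) (y+dy) (z+dz) dx dy dz = pvRunF g 8 1 1 := by
    have := pvCountA_eq_runF board player x y z dx dy dz 1 8 1
    simpa using this
  have hbwd : pvCountA board player 8 (x-dx) (y-dy) (z-dz) (-dx) (-dy) (-dz)
      = pvRunF g 8 (-1) (-1) := by
    have := pvCountA_eq_runF board player x y z dx dy dz (-1) 8 (-1)
    simp only [neg_one_mul] at this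
    rw [show x - dx = x + (-1)*dx by ring, show y - dy = y + (-1)*dy by ring,
        show z - dz = z + (-1)*dz by ring]
    simpa using this
  rw [hfwd, hbwd, pvCrux g]
  apply congrArg
  funext s
  apply congrArg
  funext t
  show (if t == 0 then true else g t) = pvCellB board x y z player dx dy dz t
  simp only [hg, pvCellB, pvCondA, pvAccess, pvAccessB]

-- ===== VERDICT (by name: the statement is the Claim_ definition above) =====
theorem check_win_from_position_spec : Claim_equal_check_win_from_position := by
  intro board x y z player _ _
  unfold Spec_check_win_from_position check_win_from_position check_win_from_position_alt
  unfold pvDirectionsA pvDirectionsB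
  simp only [List.any_cons, List.any_nil]
  rw [pvDirEq board x y z player 1 0 0, pvDirEq board x y z player 0 1 0,
      pvDirEq board x y z player 0 0 1, pvDirEq board x y z player 1 1 0,
      pvDirEq board x y z player 1 (-1) 0, pvDirEq board x y z player 1 0 1,
      pvDirEq board x y z player 1 0 (-1), pvDirEq board x y z player 0 1 1,
      pvDirEq board x y z player 0 1 (-1), pvDirEq board x y z player 1 1 1,
      pvDirEq board x y z player 1 1 (-1), pvDirEq board x y z player 1 (-1) 1,
      pvDirEq board x y z player (-1) 1 1]
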